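-- pv_equiv track=rewrite | github.com/ZScomnet/Programmers | baekjoon/Greedy/gas-station.py | solution
-- ===== SOURCE A (Python) =====
-- def solution(length,price):
-- 	answer = 0
-- 	now = price[0]
-- 	finish = 0
-- 	for i in range(len(price)):
-- 		if now > price[i]:
-- 			answer += finish*now
-- 			now = price[i]
-- 			finish = 0
-- 		finish += length[i]
-- 	if finish != 0:
-- 		answer += now * finish
-- 	return answer
-- ===== SOURCE B (Python) =====
-- def solution(length, price):
--     # Peel-the-minimum: the cheapest station in [0, hi) fuels every stretch from
--     # its position up to hi; charge it for those, then repeat on the prefix.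
--     total = 0
--     hi = len(price)
--     while hi > 0:
--         k = price.index(min(price[:hi]))
--         total += price[k] * sum(length[k:hi])
--         hi = k
--     return total
-- ===== Notes on version B (the rewrite author's own statement) =====
-- stated objective: alternative
-- what changed: B replaces A's single left-to-right greedy pass (flush-and-reset accumulators now/finish) by a peel-the-minimum loop: it repeatedly finds the cheapest station in the still-uncovered prefix with min/index, charges it for all stretches from its position to the current right boundary via a slice sum, and recurses on the prefix before it.
import Mathlib
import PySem

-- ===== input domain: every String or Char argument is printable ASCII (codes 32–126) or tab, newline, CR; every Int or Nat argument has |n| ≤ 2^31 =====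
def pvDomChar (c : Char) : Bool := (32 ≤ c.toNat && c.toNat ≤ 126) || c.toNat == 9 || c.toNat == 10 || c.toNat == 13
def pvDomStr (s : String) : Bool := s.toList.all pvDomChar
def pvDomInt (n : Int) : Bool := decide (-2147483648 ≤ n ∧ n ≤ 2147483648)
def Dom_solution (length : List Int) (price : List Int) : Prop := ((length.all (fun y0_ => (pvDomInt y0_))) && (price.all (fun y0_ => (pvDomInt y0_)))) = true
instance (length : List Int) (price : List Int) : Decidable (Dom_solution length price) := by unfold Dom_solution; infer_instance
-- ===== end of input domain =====

-- B replaces A's single greedy pass by a peel-the-minimum loop: repeatedly charge the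
-- cheapest station of the uncovered prefix for every stretch up to the current boundary,
-- then recurse on the prefix before it (objective: alternative).

-- ===== PORT A =====
def solution (length : List Int) (price : List Int) : Int :=
  -- state (answer, now, finish); the branch flushes finish*now and resets, then finish += length[i]
  let s := (PySem.List.pyRange 0 (PySem.List.len price) 1).foldl
    (fun (st : Int × Int × Int) i =>
      ((if st.2.1 > PySem.List.pyGetD price i 0 then
          (st.1 + st.2.2 * st.2.1, PySem.List.pyGetD price i 0, (0 : Int)) else st).1,
       (if st.2.1 > PySem.List.pyGetD price i 0 then
          (st.1 + st.2.2 * st.2.1, PySem.List.pyGetD price i 0, (0 : Int)) else st).2.1,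
       (if st.2.1 > PySem.List.pyGetD price i 0 then
          (st.1 + st.2.2 * st.2.1, PySem.List.pyGetD price i 0, (0 : Int)) else st).2.2
         + PySem.List.pyGetD length i 0))
    ((0 : Int), PySem.List.pyGetD price 0 0, (0 : Int))
  if s.2.2 ≠ 0 then s.1 + s.2.1 * s.2.2 else s.1

-- ===== PORT B =====
-- B's while loop; each iteration strictly decreases hi, so len(price) steps of fuel
-- make the same computation total (the fuel guard is never the reason the loop stops).
def solutionAltLoop (length price : List Int) (fuel : Nat) (hi : Nat) (total : Int) : Int :=
  match fuel with
  | 0 => total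
  | fuel + 1 =>
    if 0 < hi then
      let v := (PySem.List.min? (PySem.List.slice price (some 0) (some (hi : Int))) (fun x => x)).getD 0
      let k := (PySem.List.index? price v).getD 0
      solutionAltLoop length price fuel k
        (total + v * (PySem.List.slice length (some (k : Int)) (some (hi : Int))).sum)
    else total

def solution_alt (length : List Int) (price : List Int) : Int :=
  solutionAltLoop length price price.length price.length 0

-- ===== PRECONDITION & SPEC =====
-- Pre_ excludes exactly the inputs where Python A raises IndexError:
-- empty price (price[0]) or length shorter than price (length[i]).
def Pre_solution (length : List Int) (price : List Int) : Prop :=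
  price ≠ [] ∧ price.length ≤ length.length
instance (length : List Int) (price : List Int) : Decidable (Pre_solution length price) := by
  unfold Pre_solution; infer_instance
def pvWitness_solution : List Int × List Int := ([2, 3], [5, 1])

def Spec_solution (length : List Int) (price : List Int) (out : Int) : Prop := out = solution_alt length price
instance (length : List Int) (price : List Int) (out : Int) : Decidable (Spec_solution length price out) := by unfold Spec_solution; infer_instance

-- ===== CLAIM (what is proved, stated in full; the proofs are below) =====
def Claim_equal_solution : Prop := ∀ (length : List Int) (price : List Int), Dom_solution length price → Pre_solution length price → Spec_solution length price (solution length price)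

-- ===== LEMMAS AND PROOFS =====

/-- Running minimum of `m` over the first `i+1` prices (A's `now` after step `i`). -/
def pvMfold (m : Int) (ps : List Int) (i : Nat) : Int := (ps.take (i + 1)).foldl min m

/-- Minimum of the first `i+1` prices as B computes minima: Python `min` via `min?`. -/
def pvPmin (ps : List Int) (i : Nat) : Int :=
  ((PySem.List.min? (ps.take (i + 1)) (fun x => x)).getD 0)

/-- The common reference value: Σ_{i<e} length[i] · min(price[0..i]). -/
def pvSsum (length price : List Int) (e : Nat) : Int :=
  ((List.range e).map (fun i => length.getD i 0 * pvPmin price i)).sum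

lemma pvTakeSumGetD (t : List Int) : ∀ m : Nat,
    (t.take m).sum = ((List.range m).map (fun j => t.getD j 0)).sum := by
  induction t with
  | nil =>
      intro m
      simp [List.getD]
  | cons x t ih =>
      intro m
      cases m with
      | zero => simp
      | succ m =>
          rw [List.take_succ_cons, List.sum_cons, ih m, List.range_succ_eq_map,
            List.map_cons, List.map_map, List.sum_cons]
          have h1 : ((fun j => (x :: t).getD j 0) ∘ Nat.succ) = (fun j => t.getD j 0) := by
            funext j
            simp [Function.comp]
          rw [h1, List.getD_cons_zero]

/-- A's fold over `range(len(price))`, rewritten as a fold over the zipped lists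
(valid because `price.length ≤ length.length`, so every index is in range). -/
lemma pvIdxfold (g : (Int × Int × Int) → Int → Int → (Int × Int × Int))
    (L P : List Int) (hLP : P.length ≤ L.length) :
    ∀ (k : Nat), k ≤ P.length → ∀ (st : Int × Int × Int),
    (PySem.List.pyRange (k : Int) (P.length : Int) 1).foldl
        (fun st i => g st (PySem.List.pyGetD L i 0) (PySem.List.pyGetD P i 0)) st
      = ((L.drop k).zip (P.drop k)).foldl (fun st lp => g st lp.1 lp.2) st := by
  intro k hk
  induction hn : P.length - k generalizing k with
  | zero =>
      intro st
      have hke : k = P.length := by omega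
      subst hke
      rw [PySem.List.pyRange_one_eq_nil (by omega), List.drop_eq_nil_of_le (le_refl _)]
      simp
  | succ n ih =>
      intro st
      have hklt : k < P.length := by omega
      have hkL : k < L.length := by omega
      rw [PySem.List.pyRange_one_cons (by exact_mod_cast hklt)]
      rw [List.drop_eq_getElem_cons hkL, List.drop_eq_getElem_cons hklt]
      simp only [List.foldl_cons, List.zip_cons_cons]
      have e1 : PySem.List.pyGetD L (k : Int) 0 = L[k] := by
        rw [PySem.List.pyGetD_natCast, List.getD_eq_getElem _ _ hkL]
      have e2 : PySem.List.pyGetD P (k : Int) 0 = P[k] := by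
        rw [PySem.List.pyGetD_natCast, List.getD_eq_getElem _ _ hklt]
      have hcast : ((k : Int) + 1) = ((k + 1 : Nat) : Int) := by push_cast; ring
      rw [e1, e2, hcast, ih (k + 1) (by omega) (by omega)]

/-- `pvIdxfold` at the start index 0. -/
lemma pvIdxfold0 (g : (Int × Int × Int) → Int → Int → (Int × Int × Int))
    (L P : List Int) (hLP : P.length ≤ L.length) (st : Int × Int × Int) :
    (PySem.List.pyRange 0 (P.length : Int) 1).foldl
        (fun st i => g st (PySem.List.pyGetD L i 0) (PySem.List.pyGetD P i 0)) st
      = (L.zip P).foldl (fun st lp => g st lp.1 lp.2) st := by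
  have h := pvIdxfold g L P hLP 0 (by omega) st
  simpa using h

/-- Loop invariant: A's accumulator plus its pending `finish * now` equals the
running-minimum accumulator, and A's `now` equals the running minimum. -/
lemma pvInv (zs : List (Int × Int)) :
    ∀ (answer now finish ansB : Int), answer + finish * now = ansB →
    (zs.foldl (fun (st : Int × Int × Int) lp =>
        ((if st.2.1 > lp.2 then (st.1 + st.2.2 * st.2.1, lp.2, (0 : Int)) else st).1,
         (if st.2.1 > lp.2 then (st.1 + st.2.2 * st.2.1, lp.2, (0 : Int)) else st).2.1,
         (if st.2.1 > lp.2 then (st.1 + st.2.2 * st.2.1, lp.2, (0 : Int)) else st).2.2 + lp.1))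
        (answer, now, finish)).1
      + (zs.foldl (fun (st : Int × Int × Int) lp =>
        ((if st.2.1 > lp.2 then (st.1 + st.2.2 * st.2.1, lp.2, (0 : Int)) else st).1,
         (if st.2.1 > lp.2 then (st.1 + st.2.2 * st.2.1, lp.2, (0 : Int)) else st).2.1,
         (if st.2.1 > lp.2 then (st.1 + st.2.2 * st.2.1, lp.2, (0 : Int)) else st).2.2 + lp.1))
        (answer, now, finish)).2.2
      * (zs.foldl (fun (st : Int × Int × Int) lp =>
        ((if st.2.1 > lp.2 then (st.1 + st.2.2 * st.2.1, lp.2, (0 : Int)) else st).1,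
         (if st.2.1 > lp.2 then (st.1 + st.2.2 * st.2.1, lp.2, (0 : Int)) else st).2.1,
         (if st.2.1 > lp.2 then (st.1 + st.2.2 * st.2.1, lp.2, (0 : Int)) else st).2.2 + lp.1))
        (answer, now, finish)).2.1
      = (zs.foldl (fun (st : Int × Int) lp =>
          (st.1 + lp.1 * (if lp.2 < st.2 then lp.2 else st.2),
           if lp.2 < st.2 then lp.2 else st.2)) (ansB, now)).1
    ∧ (zs.foldl (fun (st : Int × Int × Int) lp =>
        ((if st.2.1 > lp.2 then (st.1 + st.2.2 * st.2.1, lp.2, (0 : Int)) else st).1,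
         (if st.2.1 > lp.2 then (st.1 + st.2.2 * st.2.1, lp.2, (0 : Int)) else st).2.1,
         (if st.2.1 > lp.2 then (st.1 + st.2.2 * st.2.1, lp.2, (0 : Int)) else st).2.2 + lp.1))
        (answer, now, finish)).2.1
      = (zs.foldl (fun (st : Int × Int) lp =>
          (st.1 + lp.1 * (if lp.2 < st.2 then lp.2 else st.2),
           if lp.2 < st.2 then lp.2 else st.2)) (ansB, now)).2 := by
  induction zs with
  | nil =>
      intro answer now finish ansB h
      simp only [List.foldl_nil]
      exact ⟨h, trivial⟩
  | cons z zs ih =>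
      intro answer now finish ansB h
      simp only [List.foldl_cons]
      by_cases hcmp : now > z.2
      · simp only [if_pos hcmp]
        exact ih _ _ _ _ (by ring_nf; linarith [h])
      · simp only [if_neg hcmp]
        exact ih _ _ _ _ (by ring_nf; linarith [h])

/-- A's trailing `if finish != 0` flush, abstractly. -/
lemma pvFinalFlush (a n f b : Int) (h : a + f * n = b) :
    (if f ≠ 0 then a + n * f else a) = b := by
  split_ifs with hf
  · linarith [mul_comm n f]
  · have hf' : f = 0 := by omega
    subst hf'
    simpa using h

/-- The running-minimum fold expands into the indexed sum of `length[i] * pvMfold m price i`. -/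
lemma pvZipfoldSum : ∀ (ps ls : List Int) (acc m : Int),
    ((ls.zip ps).foldl (fun (st : Int × Int) lp =>
        (st.1 + lp.1 * (if lp.2 < st.2 then lp.2 else st.2),
         if lp.2 < st.2 then lp.2 else st.2)) (acc, m)).1
      = acc + ((List.range (min ls.length ps.length)).map
          (fun i => ls.getD i 0 * pvMfold m ps i)).sum := by
  intro ps
  induction ps with
  | nil => intro ls acc m; simp
  | cons p ps ih =>
      intro ls acc m
      cases ls with
      | nil => simp
      | cons l ls =>
          simp only [List.zip_cons_cons, List.foldl_cons, List.length_cons]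
          rw [ih ls _ _]
          have hmin : (min (ls.length + 1) (ps.length + 1)) = min ls.length ps.length + 1 := by
            omega
          rw [hmin, List.range_succ_eq_map, List.map_cons, List.sum_cons, List.map_map]
          have h0 : pvMfold m (p :: ps) 0 = min m p := by
            simp [pvMfold]
          have hstep : ∀ i : Nat, pvMfold m (p :: ps) (i + 1) = pvMfold (min m p) ps i := by
            intro i; simp [pvMfold]
          have hif : (if p < m then p else m) = min m p := by
            split_ifs with h <;> omega
          have hfun : ((fun i => ls.getD i 0 * pvMfold (min m p) ps i) : Nat → Int)
              = (fun i => (l :: ls).getD i 0 * pvMfold m (p :: ps) i) ∘ Nat.succ := by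
            funext i
            simp [Function.comp, hstep i]
          simp only [hif, h0, List.getD_cons_zero]
          rw [hfun]
          ring

/-- For nonempty `ps`, Python's `min` of the prefix agrees with the running-minimum
value seeded with `ps[0]`. -/
lemma pvPminEqMfold (p0 : Int) (rest : List Int) (i : Nat) :
    pvPmin (p0 :: rest) i = pvMfold p0 (p0 :: rest) i := by
  simp only [pvPmin, pvMfold, List.take_succ_cons]
  rw [PySem.List.min?_id_cons]
  simp [List.foldl_cons]

/-- B's loop computes the reference sum `pvSsum`. -/
lemma pvAltLoopSum (length price : List Int) (hne : price ≠ []) :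
    ∀ (fuel hi : Nat) (total : Int), hi ≤ fuel → hi ≤ price.length →
    solutionAltLoop length price fuel hi total = total + pvSsum length price hi := by
  intro fuel
  induction fuel with
  | zero =>
      intro hi total hf _
      have : hi = 0 := by omega
      subst this
      simp [solutionAltLoop, pvSsum]
  | succ fuel ih =>
      intro hi total hf hn
      by_cases hhi : 0 < hi
      · -- the prefix price[:hi] is price.take hi, nonempty
        have hsl : PySem.List.slice price (some 0) (some (hi : Int)) = price.take hi := by
          rw [PySem.List.slice_zero_start, PySem.List.slice_to_natCast]
        have htne : price.take hi ≠ [] := by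
          cases price with
          | nil => exact absurd rfl hne
          | cons a l => cases hi with
            | zero => omega
            | succ m => simp
        obtain ⟨v, hv⟩ : ∃ v, PySem.List.min? (price.take hi) (fun x => x) = some v := by
          cases h : PySem.List.min? (price.take hi) (fun x => x) with
          | none => exact absurd ((PySem.List.min?_eq_none_iff _ _).mp h) htne
          | some v => exact ⟨v, rfl⟩
        have hvmem : v ∈ price.take hi := PySem.List.min?_mem hv
        have hvmin : ∀ y ∈ price.take hi, v ≤ y := by
          intro y hy; exact PySem.List.min?_isMin hv y hy
        have hvmem' : v ∈ price := List.mem_of_mem_take hvmem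
        obtain ⟨k, hk⟩ : ∃ k, PySem.List.index? price v = some k := by
          cases h : PySem.List.index? price v with
          | none => exact absurd hvmem' ((PySem.List.index?_eq_none_iff _ _).mp h)
          | some k => exact ⟨k, rfl⟩
        obtain ⟨hklen, hkv, hkfirst⟩ := PySem.List.getElem_of_index?_eq_some hk
        -- k < hi: v occurs in price.take hi and k is the first occurrence in price
        obtain ⟨j, hjlt, hjv⟩ := List.getElem_of_mem hvmem
        have hjlen : j < price.length := by
          have := hjlt; rw [List.length_take] at this; omega
        rw [List.getElem_take] at hjv
        have hkhi : k < hi := by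
          by_contra hcon
          have hjk : j < k := by
            have : j < (price.take hi).length := hjlt
            rw [List.length_take] at this; omega
          exact hkfirst j hjk hjv
        obtain ⟨d, rfl⟩ : ∃ d, hi = k + d := ⟨hi - k, by omega⟩
        -- unfold one loop step
        have hstep : solutionAltLoop length price (fuel + 1) (k + d) total
            = solutionAltLoop length price fuel k
                (total + v * (PySem.List.slice length (some (k : Int)) (some ((k + d : Nat) : Int))).sum) := by
          simp only [solutionAltLoop, if_pos hhi, hsl, hv, hk, Option.getD_some]
        rw [hstep, ih k _ (by omega) (by omega)]
        -- slice length k (k+d) sums the getD values over [k, k+d)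
        have hslice : (PySem.List.slice length (some (k : Int)) (some ((k + d : Nat) : Int))).sum
            = ((List.range d).map (fun j => length.getD (k + j) 0)).sum := by
          rw [PySem.List.slice_natCast, pvTakeSumGetD, Nat.add_sub_cancel_left]
          apply congrArg
          apply List.map_congr_left
          intro j hj
          rw [List.getD_eq_getElem?_getD, List.getD_eq_getElem?_getD, List.getElem?_drop]
        -- each index in [k, k+d) has prefix minimum v
        have hpm : ∀ j, j < d → pvPmin price (k + j) = v := by
          intro j hj
          have hsub : price.take (k + j + 1) = (price.take (k + d)).take (k + j + 1) := by
            rw [List.take_take, min_eq_left (by omega)]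
          have hne2 : price.take (k + j + 1) ≠ [] := by
            cases price with
            | nil => exact absurd rfl hne
            | cons a l => simp
          obtain ⟨w, hw⟩ : ∃ w, PySem.List.min? (price.take (k + j + 1)) (fun x => x) = some w := by
            cases h : PySem.List.min? (price.take (k + j + 1)) (fun x => x) with
            | none => exact absurd ((PySem.List.min?_eq_none_iff _ _).mp h) hne2
            | some w => exact ⟨w, rfl⟩
          have hwmem : w ∈ price.take (k + j + 1) := PySem.List.min?_mem hw
          have hvw : v ≤ w := by
            apply hvmin
            rw [hsub] at hwmem
            exact List.mem_of_mem_take hwmem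
          have hvin : v ∈ price.take (k + j + 1) := by
            have hkl : k < (price.take (k + j + 1)).length := by
              rw [List.length_take]; omega
            have h2 : (price.take (k + j + 1))[k] = v := by
              rw [List.getElem_take]; exact hkv
            rw [← h2]; exact List.getElem_mem hkl
          have hwv : w ≤ v := PySem.List.min?_isMin hw v hvin
          simp only [pvPmin, hw, Option.getD_some]
          omega
        -- split pvSsum (k + d) at k
        have hsplit : pvSsum length price (k + d)
            = pvSsum length price k
              + ((List.range d).map (fun j => length.getD (k + j) 0 * v)).sum := by
          unfold pvSsum
          rw [List.range_add, List.map_append, List.sum_append, List.map_map]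
          apply congrArg
          apply congrArg
          apply List.map_congr_left
          intro j hj
          rw [List.mem_range] at hj
          simp only [Function.comp]
          rw [hpm j hj]
        rw [hsplit, hslice]
        have hmul : ((List.range d).map (fun j => length.getD (k + j) 0 * v)).sum
            = v * ((List.range d).map (fun j => length.getD (k + j) 0)).sum := by
          induction (List.range d) with
          | nil => simp
          | cons a l ihl => simp only [List.map_cons, List.sum_cons, ihl]; ring
        rw [hmul]; ring
      · have : hi = 0 := by omega
        subst this
        simp [solutionAltLoop, pvSsum]

-- ===== VERDICT (by name: the statement is the Claim_ definition above) =====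
theorem solution_spec : Claim_equal_solution := by
  intro length price _ hpre
  obtain ⟨hne, hlen⟩ := hpre
  obtain ⟨p0, rest, rfl⟩ : ∃ p0 rest, price = p0 :: rest := by
    cases price with
    | nil => exact absurd rfl hne
    | cons a l => exact ⟨a, l, rfl⟩
  unfold Spec_solution solution solution_alt
  dsimp only [PySem.List.len_eq]
  rw [pvIdxfold0 (fun (st : Int × Int × Int) lv pv =>
      ((if st.2.1 > pv then (st.1 + st.2.2 * st.2.1, pv, (0 : Int)) else st).1,
       (if st.2.1 > pv then (st.1 + st.2.2 * st.2.1, pv, (0 : Int)) else st).2.1,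
       (if st.2.1 > pv then (st.1 + st.2.2 * st.2.1, pv, (0 : Int)) else st).2.2 + lv))
    length (p0 :: rest) hlen]
  have hA := (pvInv ((length.zip (p0 :: rest))) 0 (PySem.List.pyGetD (p0 :: rest) 0 0) 0 0 (by ring)).1
  rw [pvFinalFlush _ _ _ _ hA]
  rw [pvZipfoldSum]
  have hp0 : PySem.List.pyGetD (p0 :: rest) 0 0 = p0 := by
    simp [PySem.List.pyGetD_ofNat']
  rw [hp0]
  have hminlen : min length.length (p0 :: rest).length = (p0 :: rest).length := by
    omega
  rw [hminlen]
  rw [pvAltLoopSum length (p0 :: rest) hne _ _ 0 (le_refl _) (le_refl _)]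
  unfold pvSsum
  have : ((List.range (p0 :: rest).length).map (fun i => length.getD i 0 * pvMfold p0 (p0 :: rest) i))
      = ((List.range (p0 :: rest).length).map (fun i => length.getD i 0 * pvPmin (p0 :: rest) i)) := by
    apply List.map_congr_left
    intro i _
    rw [pvPminEqMfold]
  rw [this]
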